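-- pv_equiv track=rewrite | github.com/m-bone/AutoMapper | LammpsSearchFuncs.py | find_partial_structure
-- ===== SOURCE A (Python) =====
-- def pair_search(bond, bondAtom):
--     '''
--     Check if either atomID in a bond is the desired atomID.
--     Will return None if no match is found.
--     '''
--     if bond[2] == bondAtom:
--         return bond[3]
--     elif bond[3] == bondAtom:
--         return bond[2]
--
-- def search_loop(bonds, bondAtom):
--     nextBondAtomList = []
--
--     for searchAtom in bondAtom:
--         for bond in bonds:
--             nextAtomID = pair_search(bond, searchAtom)
--             if nextAtomID is not None:
--                 nextBondAtomList.append(nextAtomID)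
--
--     return nextBondAtomList
--
-- def find_partial_structure(bondingAtoms, originalBondList, deleteAtoms, bondDistance=3):
--     # Find bonds within a specified distance of the bonding atoms
--
--     # Convert bondingAtoms to list if string given
--     if type(bondingAtoms) == str:
--         bondingAtoms = [bondingAtoms]
--
--     # Add delete atoms to valid atoms if present
--     initialValidAtoms = bondingAtoms.copy()
--     if deleteAtoms is not None:
--         initialValidAtoms.extend(deleteAtoms) # Allows partial structure tools to work when byproducts are formed and deleted
--
--     validAtomSet = set(initialValidAtoms)
--     edgeAtomList = []
--
--     for bondAtom in bondingAtoms: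
--
--         # Make bondAtom a list
--         newBondAtomList = [bondAtom]
--
--         i = 1
--         while i <= bondDistance:
--             newBondAtomList = search_loop(originalBondList, newBondAtomList)
--             if i == 1: # First pass - Stop search from finding other bonding atom if they are bound together
--                 newBondAtomList = [val for val in newBondAtomList if val not in bondingAtoms]
--
--             if i < bondDistance: # Before bond distance is reached
--                 # Add list as individual elements
--                 for atom in newBondAtomList:
--                     validAtomSet.add(atom)
--
--             else: # Once bond distance is reached
--                 # Determine which of the last obtained atom IDs have further bonds
--                 # newBondAtomList at this point contains edge atoms of an order, and other atoms found before
--                 possibleEdgeAtoms = [val for val in newBondAtomList if val not in validAtomSet]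
--
--                 # Add list as individual elements - has to be after possibleEdgeAtoms
--                 for atom in newBondAtomList:
--                     validAtomSet.add(atom)
--
--                 # Run another loop to determine if possibleEdgeAtoms have other bonds
--                 for searchAtom in possibleEdgeAtoms:
--                     bondCount = 0
--                     for bond in originalBondList:
--                         nextAtomID = pair_search(bond, searchAtom)
--                         if nextAtomID is not None:
--                             bondCount += 1
--                     if bondCount > 1: # All atoms will have at least one bond
--                         edgeAtomList.append(searchAtom)
--
--             # Increment iterator
--             i += 1
--
--     return validAtomSet, edgeAtomList
-- ===== SOURCE B (Python) =====
-- def find_partial_structure(bondingAtoms, originalBondList, deleteAtoms, bondDistance=3):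
--     # Build an adjacency index once, then expand frontiers by dict lookups
--     # instead of rescanning the whole bond list for every search atom.
--     if type(bondingAtoms) == str:
--         bondingAtoms = [bondingAtoms]
--
--     validAtomSet = set(bondingAtoms)
--     if deleteAtoms is not None:
--         validAtomSet.update(deleteAtoms)
--
--     if not bondingAtoms or bondDistance < 1:
--         return validAtomSet, []
--
--     # atom -> neighbours, in bond order (one entry per matching bond)
--     pairs = []
--     for bond in originalBondList:
--         a, b = bond[2], bond[3]
--         pairs.append((a, b))
--         if b != a:
--             pairs.append((b, a))
--     adj = {}
--     for k, v in pairs: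
--         adj.setdefault(k, []).append(v)
--
--     edgeAtomList = []
--     for bondAtom in bondingAtoms:
--         # first shell: neighbours of the bonding atom, other bonding atoms removed
--         frontier = [n for n in adj.get(bondAtom, []) if n not in bondingAtoms]
--         for _ in range(bondDistance - 1):
--             validAtomSet.update(frontier)
--             frontier = [n for a in frontier for n in adj.get(a, [])]
--         # last shell: atoms not seen before that have more than one bond are edge atoms
--         possibleEdgeAtoms = [n for n in frontier if n not in validAtomSet]
--         validAtomSet.update(frontier)
--         edgeAtomList.extend(n for n in possibleEdgeAtoms if len(adj.get(n, [])) > 1)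
--
--     return validAtomSet, edgeAtomList
-- ===== Notes on version B (the rewrite author's own statement) =====
-- stated objective: alternative
-- what changed: B precomputes an adjacency index (atom -> neighbours in bond order) in one pass over the bond list and expands frontiers by dict lookups, replacing A's pair_search rescan of the entire bond list for every search atom and its i-indexed while-loop branches by three straight-line phases per bonding atom; the duplicate-keeping frontier itself (which dominates the cost) is unchanged.
import Mathlib
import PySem

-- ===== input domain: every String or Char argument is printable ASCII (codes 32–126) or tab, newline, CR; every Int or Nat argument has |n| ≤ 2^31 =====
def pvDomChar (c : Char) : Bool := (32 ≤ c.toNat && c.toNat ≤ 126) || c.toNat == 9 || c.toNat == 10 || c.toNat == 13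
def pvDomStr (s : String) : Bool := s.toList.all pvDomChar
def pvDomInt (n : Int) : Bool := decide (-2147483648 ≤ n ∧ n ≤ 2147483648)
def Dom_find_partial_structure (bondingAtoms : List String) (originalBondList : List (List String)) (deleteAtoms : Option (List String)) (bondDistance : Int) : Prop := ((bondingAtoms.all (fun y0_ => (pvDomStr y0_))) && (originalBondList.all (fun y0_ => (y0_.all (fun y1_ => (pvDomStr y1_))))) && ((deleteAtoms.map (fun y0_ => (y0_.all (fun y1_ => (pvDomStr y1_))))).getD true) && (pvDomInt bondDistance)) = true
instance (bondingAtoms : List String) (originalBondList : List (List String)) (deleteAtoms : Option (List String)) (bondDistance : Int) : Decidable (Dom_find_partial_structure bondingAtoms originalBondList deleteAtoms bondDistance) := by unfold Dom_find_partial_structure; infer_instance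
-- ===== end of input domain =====

-- B replaces A's repeated scans of the whole bond list by a one-pass adjacency index
-- (atom -> neighbours in bond order) consulted by dict lookups (objective: alternative
-- structure, not measured faster); the equivalence is about the return value.

-- ===== PORT A =====
def pair_search (bond : List String) (bondAtom : String) : Option String :=
  -- bond[2] / bond[3]: pyGet? none = IndexError, excluded by Pre_
  match PySem.List.pyGet? bond 2, PySem.List.pyGet? bond 3 with
  | some b2, some b3 =>
      if b2 = bondAtom then some b3
      else if b3 = bondAtom then some b2
      else none
  | _, _ => none

def search_loop (bonds : List (List String)) (bondAtom : List String) : List String :=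
  bondAtom.foldl (fun acc searchAtom =>
    bonds.foldl (fun acc2 bond =>
      match pair_search bond searchAtom with
      | some nextAtomID => acc2 ++ [nextAtomID]
      | none => acc2) acc) []

-- the bondCount loop of A's final phase
def bond_count (bonds : List (List String)) (searchAtom : String) : Int :=
  bonds.foldl (fun c bond =>
    match pair_search bond searchAtom with
    | some _ => c + 1
    | none => c) 0

-- the 'while i <= bondDistance' loop of A, fuel = number of remaining iterations
def loopA (bonds : List (List String)) (bondingAtoms : List String) (bd : Int) :
    Nat → Int → List String → PySem.Set String → List String → PySem.Set String × List String
  | 0, _, _, valid, edges => (valid, edges)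
  | fuel+1, i, frontier, valid, edges =>
      let f1 := search_loop bonds frontier
      let f2 := if i = 1 then f1.filter (fun v => !(bondingAtoms.contains v)) else f1
      if i < bd then
        loopA bonds bondingAtoms bd fuel (i+1) f2 (PySem.Set.update valid f2) edges
      else
        let possible := f2.filter (fun v => !(PySem.Set.contains valid v))
        let valid' := PySem.Set.update valid f2
        let edges' := possible.foldl (fun e sA => if bond_count bonds sA > 1 then e ++ [sA] else e) edges
        loopA bonds bondingAtoms bd fuel (i+1) f2 valid' edges'

def find_partial_structure (bondingAtoms : List String) (originalBondList : List (List String)) (deleteAtoms : Option (List String)) (bondDistance : Int) : List String × List String :=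
  let initialValidAtoms := bondingAtoms ++ (match deleteAtoms with | some d => d | none => [])
  let validAtomSet : PySem.Set String := PySem.Set.ofList initialValidAtoms
  bondingAtoms.foldl
    (fun (st : PySem.Set String × List String) bondAtom =>
      loopA originalBondList bondingAtoms bondDistance bondDistance.toNat 1 [bondAtom] st.1 st.2)
    (validAtomSet, [])

-- ===== PORT B =====
def build_pairs (bonds : List (List String)) : List (String × String) :=
  bonds.foldl (fun acc bond =>
    match PySem.List.pyGet? bond 2, PySem.List.pyGet? bond 3 with
    | some a, some b =>
        let acc1 := acc ++ [(a, b)]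
        if b ≠ a then acc1 ++ [(b, a)] else acc1
    | _, _ => acc) []  -- bond[2]/bond[3] IndexError, excluded by Pre_

def build_adj (pairs : List (String × String)) : PySem.Dict String (List String) :=
  pairs.foldl (fun d p => d.modify p.1 [] (fun l => l ++ [p.2])) PySem.Dict.empty

-- 'for _ in range(bondDistance - 1)' of B
def loopBmid (adj : PySem.Dict String (List String)) :
    Nat → List String → PySem.Set String → List String × PySem.Set String
  | 0, frontier, valid => (frontier, valid)
  | n+1, frontier, valid =>
      loopBmid adj n (frontier.flatMap (fun a => adj.getD a []))
        (PySem.Set.update valid frontier)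

def perAtomB (adj : PySem.Dict String (List String)) (bondingAtoms : List String) (bd : Int)
    (bondAtom : String) (valid : PySem.Set String) (edges : List String) :
    PySem.Set String × List String :=
  let frontier0 := (adj.getD bondAtom []).filter (fun n => !(bondingAtoms.contains n))
  let fv := loopBmid adj (bd - 1).toNat frontier0 valid
  let possible := fv.1.filter (fun n => !(PySem.Set.contains fv.2 n))
  let valid2 := PySem.Set.update fv.2 fv.1
  let edges2 := edges ++ possible.filter (fun n => (adj.getD n []).length > 1)
  (valid2, edges2)

def find_partial_structure_alt (bondingAtoms : List String) (originalBondList : List (List String)) (deleteAtoms : Option (List String)) (bondDistance : Int) : List String × List String :=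
  let valid0 : PySem.Set String :=
    PySem.Set.update (PySem.Set.ofList bondingAtoms)
      (match deleteAtoms with | some d => d | none => [])
  if bondingAtoms.isEmpty || bondDistance < 1 then (valid0, [])
  else
    let adj := build_adj (build_pairs originalBondList)
    bondingAtoms.foldl
      (fun (st : PySem.Set String × List String) bondAtom =>
        perAtomB adj bondingAtoms bondDistance bondAtom st.1 st.2)
      (valid0, [])

-- ===== PRECONDITION & SPEC =====
-- Pre_ excludes exactly the inputs where Python A raises IndexError: a bond with fewer
-- than 4 entries, reached because the search loop actually runs (bondingAtoms nonempty
-- and bondDistance >= 1 make A scan every bond).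
def Pre_find_partial_structure (bondingAtoms : List String) (originalBondList : List (List String)) (deleteAtoms : Option (List String)) (bondDistance : Int) : Prop :=
  bondingAtoms = [] ∨ bondDistance < 1 ∨ ∀ bond ∈ originalBondList, 4 ≤ bond.length
instance (bondingAtoms : List String) (originalBondList : List (List String)) (deleteAtoms : Option (List String)) (bondDistance : Int) : Decidable (Pre_find_partial_structure bondingAtoms originalBondList deleteAtoms bondDistance) := by unfold Pre_find_partial_structure; infer_instance

def pvWitness_find_partial_structure : List String × List (List String) × Option (List String) × Int :=
  (["1"], [["1", "1", "1", "2"], ["2", "1", "2", "3"]], none, 2)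

def Spec_find_partial_structure (bondingAtoms : List String) (originalBondList : List (List String)) (deleteAtoms : Option (List String)) (bondDistance : Int) (out : List String × List String) : Prop := out = find_partial_structure_alt bondingAtoms originalBondList deleteAtoms bondDistance
instance (bondingAtoms : List String) (originalBondList : List (List String)) (deleteAtoms : Option (List String)) (bondDistance : Int) (out : List String × List String) : Decidable (Spec_find_partial_structure bondingAtoms originalBondList deleteAtoms bondDistance out) := by unfold Spec_find_partial_structure; infer_instance

-- ===== CLAIM (what is proved, stated in full; the proofs are below) =====
def Claim_equal_find_partial_structure : Prop := ∀ (bondingAtoms : List String) (originalBondList : List (List String)) (deleteAtoms : Option (List String)) (bondDistance : Int), Dom_find_partial_structure bondingAtoms originalBondList deleteAtoms bondDistance → Pre_find_partial_structure bondingAtoms originalBondList deleteAtoms bondDistance → Spec_find_partial_structure bondingAtoms originalBondList deleteAtoms bondDistance (find_partial_structure bondingAtoms originalBondList deleteAtoms bondDistance)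

-- ===== LEMMAS AND PROOFS =====

-- the list of neighbours a single search atom collects from the bond list, in bond order
def matches1 (bonds : List (List String)) (a : String) : List String :=
  bonds.flatMap (fun bond => match pair_search bond a with | some x => [x] | none => [])

lemma inner_loop_eq (bonds : List (List String)) (a : String) (acc : List String) :
    bonds.foldl (fun acc2 bond =>
      match pair_search bond a with
      | some nextAtomID => acc2 ++ [nextAtomID]
      | none => acc2) acc = acc ++ matches1 bonds a := by
  induction bonds generalizing acc with
  | nil => simp [matches1]
  | cons b bs ih =>
      simp only [List.foldl_cons, matches1, List.flatMap_cons]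
      cases pair_search b a <;> simp [ih, matches1]

lemma search_loop_eq (bonds : List (List String)) (fr : List String) :
    search_loop bonds fr = fr.flatMap (matches1 bonds) := by
  unfold search_loop
  suffices h : ∀ acc, fr.foldl (fun acc searchAtom =>
      bonds.foldl (fun acc2 bond =>
        match pair_search bond searchAtom with
        | some nextAtomID => acc2 ++ [nextAtomID]
        | none => acc2) acc) acc = acc ++ fr.flatMap (matches1 bonds) by
    simpa using h []
  induction fr with
  | nil => simp
  | cons x xs ih => intro acc; simp [inner_loop_eq, List.flatMap]

lemma bond_count_eq (bonds : List (List String)) (a : String) :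
    bond_count bonds a = ((matches1 bonds a).length : Int) := by
  unfold bond_count
  suffices h : ∀ c : Int, bonds.foldl (fun c bond =>
      match pair_search bond a with
      | some _ => c + 1
      | none => c) c = c + ((matches1 bonds a).length : Int) by
    simpa using h 0
  induction bonds with
  | nil => simp [matches1]
  | cons b bs ih =>
      intro c
      simp only [List.foldl_cons, matches1, List.flatMap_cons]
      cases pair_search b a <;> simp [ih, matches1] <;> ring

def pairs_of (bond : List String) : List (String × String) :=
  match PySem.List.pyGet? bond 2, PySem.List.pyGet? bond 3 with
  | some a, some b => if b ≠ a then [(a, b), (b, a)] else [(a, b)]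
  | _, _ => []

lemma build_pairs_eq (bonds : List (List String)) :
    build_pairs bonds = bonds.flatMap pairs_of := by
  unfold build_pairs
  suffices h : ∀ acc, bonds.foldl (fun acc bond =>
      match PySem.List.pyGet? bond 2, PySem.List.pyGet? bond 3 with
      | some a, some b =>
          let acc1 := acc ++ [(a, b)]
          if b ≠ a then acc1 ++ [(b, a)] else acc1
      | _, _ => acc) acc = acc ++ bonds.flatMap pairs_of by
    simpa using h []
  induction bonds with
  | nil => simp
  | cons b bs ih =>
      intro acc
      simp only [List.foldl_cons, List.flatMap_cons]
      rcases h2 : PySem.List.pyGet? b 2 with _ | a2 <;>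
        rcases h3 : PySem.List.pyGet? b 3 with _ | a3 <;>
          simp only [pairs_of, h2, h3, ih] <;> (try split_ifs) <;> simp

lemma pairs_filter_eq (bonds : List (List String)) (x : String) :
    (((build_pairs bonds).filter (fun p => p.1 == x)).map (fun p => p.2)) = matches1 bonds x := by
  rw [build_pairs_eq]
  induction bonds with
  | nil => simp [matches1]
  | cons b bs ih =>
      simp only [List.flatMap_cons, List.filter_append, List.map_append, matches1] at *
      rw [ih]
      congr 1
      unfold pairs_of pair_search
      rcases PySem.List.pyGet? b 2 with _ | a2 <;> rcases PySem.List.pyGet? b 3 with _ | a3 <;>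
        simp
      split_ifs <;> simp_all

lemma adj_getD_eq (bonds : List (List String)) (x : String) :
    (build_adj (build_pairs bonds)).getD x [] = matches1 bonds x := by
  unfold build_adj
  rw [PySem.Dict.getD_foldl_modify_append, PySem.Dict.getD_empty]
  simpa using pairs_filter_eq bonds x

-- A's edge-collecting inner loop is an append of a filter
lemma edge_loop_eq (bonds : List (List String)) (adj : PySem.Dict String (List String))
    (hadj : ∀ a, adj.getD a [] = matches1 bonds a) (possible edges : List String) :
    possible.foldl (fun e sA => if bond_count bonds sA > 1 then e ++ [sA] else e) edges
      = edges ++ possible.filter (fun n => (adj.getD n []).length > 1) := by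
  induction possible generalizing edges with
  | nil => simp
  | cons x xs ih =>
      have hc : (bond_count bonds x > 1) ↔ ((adj.getD x []).length > 1) := by
        rw [bond_count_eq, hadj]; exact_mod_cast Iff.rfl
      simp only [List.foldl_cons, List.filter_cons]
      by_cases h : (adj.getD x []).length > 1
      · rw [if_pos (hc.mpr h), ih, if_pos (by simpa using h)]; simp
      · rw [if_neg (fun hh => h (hc.mp hh)), ih, if_neg (by simpa using h)]

lemma loopA_succ (bonds : List (List String)) (bas : List String) (bd : Int)
    (fuel : Nat) (i : Int) (frontier : List String) (valid : PySem.Set String)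
    (edges : List String) :
    loopA bonds bas bd (fuel+1) i frontier valid edges =
      (let f1 := search_loop bonds frontier
       let f2 := if i = 1 then f1.filter (fun v => !(bas.contains v)) else f1
       if i < bd then
         loopA bonds bas bd fuel (i+1) f2 (PySem.Set.update valid f2) edges
       else
         let possible := f2.filter (fun v => !(PySem.Set.contains valid v))
         let valid' := PySem.Set.update valid f2
         let edges' := possible.foldl (fun e sA => if bond_count bonds sA > 1 then e ++ [sA] else e) edges
         loopA bonds bas bd fuel (i+1) f2 valid' edges') := rfl

-- middle phase: A's while-loop body for 2 ≤ i ≤ bd matches B's mid loop + final phase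
lemma loopM (bonds : List (List String)) (bas : List String) (bd : Int)
    (adj : PySem.Dict String (List String))
    (hadj : ∀ a, adj.getD a [] = matches1 bonds a) :
    ∀ (n : Nat) (fr : List String) (valid : PySem.Set String) (edges : List String),
      (n : Int) + 2 ≤ bd →
      loopA bonds bas bd (n+1) (bd - n) fr (PySem.Set.update valid fr) edges =
        (let fv := loopBmid adj (n+1) fr valid
         let possible := fv.1.filter (fun x => !(PySem.Set.contains fv.2 x))
         (PySem.Set.update fv.2 fv.1,
          edges ++ possible.filter (fun x => (adj.getD x []).length > 1))) := by
  intro n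
  induction n with
  | zero =>
      intro fr valid edges hbd
      have h1 : ¬ ((bd - ((0:Nat):Int)) = 1) := by push_cast; omega
      have h2 : ¬ (bd - ((0:Nat):Int) < bd) := by push_cast; omega
      rw [loopA_succ]
      simp only [if_neg h1, if_neg h2, loopA, loopBmid]
      rw [search_loop_eq]
      have hfr : fr.flatMap (matches1 bonds) = fr.flatMap (fun a => adj.getD a []) := by
        apply List.flatMap_congr; intro a _; rw [hadj]
      rw [hfr, edge_loop_eq bonds adj hadj]
  | succ k ih =>
      intro fr valid edges hbd
      have h1 : ¬ ((bd - (((k+1:Nat)):Int)) = 1) := by push_cast at hbd ⊢; omega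
      have h2 : bd - (((k+1:Nat)):Int) < bd := by push_cast at hbd ⊢; omega
      rw [loopA_succ]
      simp only [if_neg h1, if_pos h2]
      rw [search_loop_eq]
      have hfr : fr.flatMap (matches1 bonds) = fr.flatMap (fun a => adj.getD a []) := by
        apply List.flatMap_congr; intro a _; rw [hadj]
      rw [hfr]
      have hi : bd - (((k+1:Nat)):Int) + 1 = bd - (k:Nat) := by push_cast; ring
      rw [hi]
      have := ih (fr.flatMap (fun a => adj.getD a [])) (PySem.Set.update valid fr) edges
        (by push_cast at hbd ⊢; omega)
      rw [this]
      simp only [loopBmid]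

-- per bonding atom: A's whole while-loop matches B's three straight-line phases
lemma perAtom_eq (bonds : List (List String)) (bas : List String) (bd : Int)
    (adj : PySem.Dict String (List String))
    (hadj : ∀ a, adj.getD a [] = matches1 bonds a)
    (hbd : 1 ≤ bd) (bondAtom : String) (valid : PySem.Set String) (edges : List String) :
    loopA bonds bas bd bd.toNat 1 [bondAtom] valid edges =
      perAtomB adj bas bd bondAtom valid edges := by
  obtain ⟨m, hm⟩ : ∃ m : Nat, bd.toNat = m + 1 := ⟨bd.toNat - 1, by omega⟩
  rw [hm]
  have hsingle : search_loop bonds [bondAtom] = adj.getD bondAtom [] := by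
    rw [search_loop_eq, hadj]; simp [matches1]
  rw [loopA_succ]
  by_cases h2 : 2 ≤ bd
  · -- bd ≥ 2: first iteration filters and adds, then the middle lemma
    have hlt : (1:Int) < bd := by omega
    simp only [if_pos hlt]
    rw [hsingle]
    have hmm : (m : Int) + 1 = bd := by omega
    obtain ⟨k, hk⟩ : ∃ k : Nat, m = k + 1 := ⟨m - 1, by omega⟩
    subst hk
    have hi : (1:Int) + 1 = bd - (k:Nat) := by push_cast at hmm ⊢; omega
    rw [hi, loopM bonds bas bd adj hadj k _ valid edges (by push_cast at hmm ⊢; omega)]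
    unfold perAtomB
    have hn : (bd - 1).toNat = k + 1 := by omega
    rw [hn]
    simp only [loopBmid, if_true]
  · -- bd = 1: the single iteration is already the final phase
    have hbd1 : bd = 1 := by omega
    subst hbd1
    have hm0 : m = 0 := by omega
    subst hm0
    simp only [if_neg (lt_irrefl (1 : Int)), loopA]
    rw [hsingle, edge_loop_eq bonds adj hadj]
    unfold perAtomB
    have hn : ((1:Int) - 1).toNat = 0 := by omega
    rw [hn]
    simp only [loopBmid, if_true]

lemma foldl_id {α β : Type} (f : β → α → β) (l : List α) (init : β)
    (h : ∀ st a, f st a = st) : l.foldl f init = init := by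
  induction l generalizing init with
  | nil => rfl
  | cons x xs ih => rw [List.foldl_cons, h]; exact ih init

-- ===== VERDICT (by name: the statement is the Claim_ definition above) =====
theorem find_partial_structure_spec : Claim_equal_find_partial_structure := by
  intro bas obl da bd _hdom hpre
  unfold Spec_find_partial_structure find_partial_structure find_partial_structure_alt
  dsimp only
  set dels := (match da with | some d => d | none => ([] : List String)) with hdels
  have hinit : PySem.Set.ofList (bas ++ dels) =
      PySem.Set.update (PySem.Set.ofList bas) dels := PySem.Set.ofList_append _ _
  by_cases hguard : (bas.isEmpty || decide (bd < 1)) = true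
  · -- A's loop does nothing: either no bonding atoms or zero iterations of fuel
    rw [if_pos hguard]
    have hcases : bas = [] ∨ bd < 1 := by simpa using hguard
    rcases hcases with h | h
    · subst h
      rw [hinit]
      simp
    · have hfuel : bd.toNat = 0 := by omega
      rw [foldl_id _ _ _ (by intro st a; rw [hfuel]; rfl), hinit]
  · rw [if_neg hguard]
    have hbas : ¬ bas.isEmpty := by
      intro hh; exact hguard (by simp [hh])
    have hbd : 1 ≤ bd := by
      by_contra hh
      exact hguard (by simp; omega)
    have hadj : ∀ a, (build_adj (build_pairs obl)).getD a [] = matches1 obl a :=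
      adj_getD_eq obl
    have hstep : (fun (st : PySem.Set String × List String) bondAtom =>
        loopA obl bas bd bd.toNat 1 [bondAtom] st.1 st.2) =
        (fun (st : PySem.Set String × List String) bondAtom =>
          perAtomB (build_adj (build_pairs obl)) bas bd bondAtom st.1 st.2) := by
      funext st a
      exact perAtom_eq obl bas bd _ hadj hbd a st.1 st.2
    rw [hinit, hstep]
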